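/-
  SEGMENT .2 OF `start_decoder` (0x113a2b–0x113b1d + 0x113b7a–0x113c07: the first page and the identification header's packet type,
  stb_vorbis_fixed.c 3614–3641; 87 instructions, 12 contract calls, 4 check sites) SPLIT AT THE RETURN OF start_page, THE RETURN OF
  getn, AND THE ENTRIES OF THE SEVEN ERROR STUBS: the assertion of a point inside the segment (`P2.Pt`), the claims of the four
  children, and the composition `Seg2.of_parts` (pure logic: `ReachVia.trans`; no machine step).

      .2a  0x113a2b–0x113a41, returns into 0x113a46 (cut2)   the checked store `f->first_decode = TRUE`, `start_page(f)`
                                                             exit: Body2b (a point at cut2 ∧ eax ∈ {0,1} ∧ (eax = 1 → next_seg = 0))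
      .2b  0x113a46–0x113acc + 0x113bee–0x113bf8             `!start_page` → the epilogue; the three page-flag tests, `segment_count
                                                             == 1` (spilled: ONE20, Z10), `segments[0]`: 30 → `get8(f) == 1` → .3;
                                                             64 → `getn(f, header, 6)` returns into 0x113ad1 (cut3); else → stub
                                                             exits: At3, AtERR, a point at a stub (b7a b89 b98 baa b15 bfa), a point at cut3
      .2c  0x113ad1–0x113b0f + 0x113bbc–0x113bd6             the fishead diagnosis: `header[0..5] == "fishea"`, `get8(f) == 'd'`,
                                                             `get8(f) == 0`: EVERY path ends in a stub (b15 or bdc)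
                                                             exit: a point at a stub
      .2d  the seven stubs 0x113b15 0x113b7a 0x113b89 0x113b98 0x113baa 0x113bdc 0x113bfa: `mov esi, code ; mov rdi, rbp ;
           call error ; jmp 113b22` (0x113b15: the call returns INTO 0x113b22)              exit: AtERR (eax = 0, SD.ERR)

  WHAT IS LIVE ACROSS A CALL: only the callee-saved registers and the stack slots. Read off c/vorbis_f.dis 113a2b … 113c07:
      0x113a46 (cut2)   reads eax (`test eax, eax`: start_page's result ∈ {0, 1}; 0 → 0x113b22), rbp (= f: every later access is
                        `[rbp + …]` / `mov rdi, rbp`), rsp. Nothing else: rbx (= base >> 3) is dead until the epilogue reloads `[rsp + 8]`.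
      0x113ad1 (cut3)   reads eax (tested; both values handled by .2c), `[rsp + 0xa0 … 0xa5]` (header, compared only: any bytes; no
                        check site, the frame object is addressed by constant offsets), rbp, rsp. `[rsp + 0x10]` / `[rsp + 0x20]`
                        (Z10 / ONE20) are written before but NOT asserted: no path from cut3 reaches .3.
      the stubs         read rbp (`mov rdi, rbp`), rsp.
      0x113bc4 / 0x113bd4 / 0x113bf6 (returns of the three get8) are INSIDE .2c / .2b: al compared, rbp, rsp.
  At3 (0x113c0c) is reached from 0x113bf8 only: ONE20 (`[R+20H] = segment_count = 1`, 0x113a90 + the branch 0x113a97), Z10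
  (`[R+10H] = page_flag & 1 = 0`, 0x113a74 + the branch 0x113a78), `next_seg = 0` (start_page returned 1; get8 does not write it):
  `P2.Pt.at3`. The error exits before 0x113a9d have no ONE20 yet: `Failed` comes from `P2.Inv.failed`, NOT from `Failed.of_sd`.
-/
import Vorbis.Spec.StartDecoderA
import Vorbis.LabelsAt
import Vorbis.Spec.Reader

namespace Vorbis.Spec.StartDecoder
open X86 X86.User Asan

namespace P2

/-- The live objects inside the function contain those of the callers (the own frame's objects come on top). -/
theorem callers_live (g : Ghost) (others : List Obj) (o : Obj) (ho : o ∈ stackObjs g.frames ++ others) :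
    o ∈ stackObjs g.frames' ++ others := by
  unfold Ghost.frames'
  rw [stackObjs_cons]
  rcases List.mem_append.mp ho with h1 | h2
  · exact List.mem_append_left _ (List.mem_append_right _ h1)
  · exact List.mem_append_right _ h2

/-- The geometry of the activation, as numbers for `omega`: the steady stack pointer, the stack region, and where `*f` is
(above the return-address slot, or off the stack region; off the global `log2_4`). -/
structure Geo (g : Ghost) : Prop where
  /-- the steady stack pointer lies `depth − 8 = 1480` bytes below the return-address slot (`Frame.r_eq`) -/
  r : g.R + 1480 = g.RA
  /-- the steady stack pointer is 8-aligned (`Frame.r_eq`) -/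
  r8 : g.R % 8 = 0
  /-- the stack region has room for the own frame and the callees' frames below it (`Frame.ra`) -/
  lo : 0x700000 + 1888 ≤ g.RA
  /-- the return-address slot is inside the stack region (`Frame.ra`) -/
  hi : g.RA + 8 ≤ 0x800000
  /-- `*f` is above the return-address slot (an object of a caller's frame) or off the stack region (`obj_where`) -/
  obj : g.RA + 8 ≤ g.f ∨ g.f + 1808 ≤ 0x700000 ∨ 0x800000 ≤ g.f
  /-- `*f` is above the text -/
  objLo : 0x119d40 ≤ g.f
  /-- `*f` is a lawful block (`BlkOK.inside`) -/
  objHi : g.f + 1808 ≤ 0xC00000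
  /-- `*f` is apart from the global `log2_4` (SH7 of `Frame` reads it) -/
  log2 : g.f + 1808 ≤ 0x120640 ∨ 0x120650 ≤ g.f

/-- `*f` lies above the return-address slot of start_decoder, or off the stack region: it is inside ONE live object of the
callers' frames (which lie above `RA + 8`: `Frame.callers`) or of `A.2` (off the stack: `ShadowInv.off`). -/
theorem obj_where {u₀ : State} {g : Ghost} {pc : Word} {A : Arena × List Obj} {v : State} (hf : Frame u₀ g pc A v)
    (hh : g.Hand A) : g.RA + 8 ≤ g.f ∨ g.f + 1808 ≤ 0x700000 ∨ 0x800000 ≤ g.f := by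
  obtain ⟨o, ho, h1, h2⟩ := hh.obj
  simp only [voff] at h2
  rcases List.mem_append.mp ho with hs | hoth
  · unfold stackObjs at hs
    obtain ⟨bF, hbF, hin⟩ := List.mem_flatMap.mp hs
    obtain ⟨k1, k2, _, _, _⟩ := hf.shadow.stack.active bF (List.mem_cons_of_mem _ hbF)
    obtain ⟨g1, g2⟩ := FrameLayout.objsAt_gran k1 k2 hin
    have hc := hf.callers bF hbF
    have e1 : o.gLo = o.base / 8 := rfl
    left
    omega
  · have hoff := hf.shadow.off o hoth
    unfold OffStack at hoff
    right
    omega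

/-- The geometry from the common part of a cut point, the hand-over carrier, and the lawful block predicate. -/
theorem geo_of {u₀ : State} {g : Ghost} {pc : Word} {A : Arena × List Obj} {v : State} {mem : Mem} (hf : Frame u₀ g pc A v)
    (hh : g.Hand A) (hok : BlkOK (g.Blk A)) (hbits : Bits (g.Blk A) g.len mem g.f) : Geo g := by
  obtain ⟨r1, r2⟩ := hf.r_eq
  obtain ⟨_, a2, a3⟩ := hf.ra
  simp only [depth, steady] at r1 a2
  have hob : g.Blk A (objBlock g.f) := hbits.OB1
  have hin := hok.inside _ hob
  have hlg : g.Blk A ⟨0x120640, 16⟩ := by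
    apply runBlk_extra
    simp only [fixedBlocks, globalBlocks, List.mem_cons, true_or, or_true]
  have hd := hok.apart _ _ hob hlg
  simp only [vblock, voff] at hin
  have hwh := (hh.obj.mono (callers_live g A.2)).where_ hf.shadow hf.offText (by decide)
  refine ⟨r1, r2, a2, a3, obj_where hf hh, hwh.1, hin.2, ?_⟩
  rcases hd with e | hd
  · have e2 := congrArg Block.size e
    simp only [objBlock, voff] at e2
    omega
  · simp only [vblock, voff] at hd
    omega

/-- **What holds of the memory at every point of segment `.2` after the store `first_decode = 1`**: the clauses of P3 that the
segment keeps (the environment, the fresh arena, `Bits f`, the zero ranges), and `first_decode = 1`. `SD 0` without ONE20 / Z10. -/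
structure Inv (g : Ghost) (A : Arena × List Obj) (mem : Mem) : Prop where
  /-- the environment: lawful blocks, all live (P3's `env`; shadow-only, kept by `ShadowUntouched`) -/
  env : Env (g.Blk A) (g.Live A) mem
  /-- the arena layer (reads `*f` at offsets 112 … 136 only, which nothing in the segment writes) -/
  arena : ArenaOK A.1 A.2 mem g.f
  /-- no temporary allocation yet (P3's `fresh`) -/
  noTemps : A.1.temps = []
  /-- the readers' invariant `Bits f` (every reader's post gives it back) -/
  bits : Bits (g.Blk A) g.len mem g.f
  /-- `f->first_decode = TRUE` (0x113a37, line 3614) -/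
  first : stb_vorbis.first_decode mem g.f = 1
  /-- `discard_samples_deferred = 0` (H0's zero range, at offset 1784: outside every reader's footprint) -/
  discard0 : stb_vorbis.discard_samples_deferred mem g.f = 0
  /-- `vendor … stream` (offsets 24 … 48) still zero -/
  zvendor : ZeroRange mem g.f Off.stb_vorbis.vendor Off.stb_vorbis.stream
  /-- everything from `codebook_count` on (offsets 160 … 1480) still zero -/
  rest : RestZero mem g.f Off.stb_vorbis.codebook_count

/-- **A window the segment (and its callees) may store into**: the stack below `[R + 8]`, the own frame between the spill slots
and the saved registers (`[R+10H]`, `[R+20H]`, the object `header`), and the windows of `*f` that the readers write (stream,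
p_first, eof + error, the page fields, next_seg, end_seg_with_known_loc). -/
def OkWin (g : Ghost) (w : Span) : Prop :=
  (g.RA - 1888 ≤ w.lo ∧ w.hi ≤ g.R + 8) ∨ (g.R + 0x10 ≤ w.lo ∧ w.hi ≤ g.R + 0x598) ∨
  (g.f + 48 ≤ w.lo ∧ w.hi ≤ g.f + 56) ∨ (g.f + 84 ≤ w.lo ∧ w.hi ≤ g.f + 96) ∨ (g.f + 136 ≤ w.lo ∧ w.hi ≤ g.f + 144) ∨
  (g.f + 1484 ≤ w.lo ∧ w.hi ≤ g.f + 1748) ∨ (g.f + 1752 ≤ w.lo ∧ w.hi ≤ g.f + 1756) ∨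
  (g.f + 1776 ≤ w.lo ∧ w.hi ≤ g.f + 1784)

/-- **`Inv` over a batch of allowed stores** that leaves the shadow alone; `Bits` is given for the new memory (a reader's post, or
`Bits.frame_fields`). -/
theorem Inv.carry {g : Ghost} {A : Arena × List Obj} {mem mem' : Mem} {ws : List Span} (h : Inv g A mem) (geo : Geo g)
    (hs : Mem.SameExcept ws mem mem') (hw : ∀ w, w ∈ ws → OkWin g w) (hun : ShadowUntouched mem mem')
    (hbits : Bits (g.Blk A) g.len mem' g.f) : Inv g A mem' := by
  obtain ⟨r1, r2, a2, a3, hobj, hlo, hhi, _⟩ := geo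
  have e1 : Mem.EqOn (g.f + 112) (g.f + 136) mem mem' := by
    apply hs.eqOn
    intro w hw'
    have := hw w hw'
    unfold OkWin at this
    omega
  have e2 : Mem.EqOn (g.f + 1749) (g.f + 1750) mem mem' := by
    apply hs.eqOn
    intro w hw'
    have := hw w hw'
    unfold OkWin at this
    omega
  have e3 : Mem.EqOn (g.f + 1784) (g.f + 1788) mem mem' := by
    apply hs.eqOn
    intro w hw'
    have := hw w hw'
    unfold OkWin at this
    omega
  have e4 : Mem.EqOn (g.f + 24) (g.f + 48) mem mem' := by
    apply hs.eqOn
    intro w hw'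
    have := hw w hw'
    unfold OkWin at this
    omega
  have e5 : Mem.EqOn (g.f + 160) (g.f + 1480) mem mem' := by
    apply hs.eqOn
    intro w hw'
    have := hw w hw'
    unfold OkWin at this
    omega
  refine ⟨h.env.eqOn hun, ?_, h.noTemps, hbits, ?_, ?_, ?_, ?_⟩
  · apply h.arena.frame
    · simp only [voff]
      omega
    · simp only [voff]
      exact e1
  · have e : stb_vorbis.first_decode mem' g.f = stb_vorbis.first_decode mem g.f := by
      simp only [vacc, voff]
      exact e2.u8 _ (by omega) (by omega) (by omega)
    rw [e]
    exact h.first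
  · have e : stb_vorbis.discard_samples_deferred mem' g.f = stb_vorbis.discard_samples_deferred mem g.f := by
      simp only [vacc, voff]
      exact e3.i32 _ (by omega) (by omega) (by omega)
    rw [e]
    exact h.discard0
  · have hz := h.zvendor
    simp only [voff] at hz ⊢
    exact hz.frame e4 (by omega)
  · have hz := h.rest
    unfold RestZero at hz ⊢
    simp only [voff] at hz ⊢
    exact hz.frame e5 (by omega)

/-- **A window that no field of `Frame` reads**: the stack below `[R + 8]`, the own frame between the spill slots and the saved
registers, or any window inside `*f`. Every store of part 1 of start_decoder (its own and its callees') goes into such a window. -/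
def FrameWin (g : Ghost) (w : Span) : Prop :=
  (g.RA - 1888 ≤ w.lo ∧ w.hi ≤ g.R + 8) ∨ (g.R + 0x10 ≤ w.lo ∧ w.hi ≤ g.R + 0x598) ∨ (g.f ≤ w.lo ∧ w.hi ≤ g.f + 1808)

/-- **The common part `Frame` over a batch of stores into `FrameWin` windows** that leaves the shadow alone (the general form:
`Frame` reads nothing of `*f`): the new state has the same stack pointer; its program counter, the code span and DF / MXCSR come from
the walk. -/
theorem frame_carry_win {u₀ : State} {g : Ghost} {pc pc' : Word} {A : Arena × List Obj} {v v' : State} {ws : List Span}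
    (hf : Frame u₀ g pc A v) (geo : Geo g) (hrip : v'.rip = pc') (hrsp : v'.reg .rsp = v.reg .rsp)
    (hcode : CodeOK u₀ v'.mem) (hinv : abiInv v') (hs : Mem.SameExcept ws v.mem v'.mem) (hw : ∀ w, w ∈ ws → FrameWin g w)
    (hun : ShadowUntouched v.mem v'.mem) : Frame u₀ g pc' A v' := by
  obtain ⟨r1, r2, a2, a3, hobj, hlo, hhi, hlg⟩ := geo
  have e1 : Mem.EqOn (g.R + 8) (g.R + 16) v.mem v'.mem := by
    apply hs.eqOn
    intro w hw'
    have := hw w hw'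
    unfold FrameWin at this
    omega
  have e2 : Mem.EqOn (g.R + 0x598) (g.R + 0x5d0) v.mem v'.mem := by
    apply hs.eqOn
    intro w hw'
    have := hw w hw'
    unfold FrameWin at this
    omega
  have e3 : Mem.EqOn 0x120640 0x120650 v.mem v'.mem := by
    apply hs.eqOn
    intro w hw'
    have := hw w hw'
    unfold FrameWin at this
    omega
  refine
    { entry := hf.entry
      rip := hrip
      rsp := by rw [hrsp]; exact hf.rsp
      shadowIdx := by rw [e1.u64 _ (by omega) (by omega) (by omega)]; exact hf.shadowIdx
      saved_rbx := by rw [e2.u64 _ (by omega) (by omega) (by omega)]; exact hf.saved_rbx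
      saved_rbp := by rw [e2.u64 _ (by omega) (by omega) (by omega)]; exact hf.saved_rbp
      saved_r12 := by rw [e2.u64 _ (by omega) (by omega) (by omega)]; exact hf.saved_r12
      saved_r13 := by rw [e2.u64 _ (by omega) (by omega) (by omega)]; exact hf.saved_r13
      saved_r14 := by rw [e2.u64 _ (by omega) (by omega) (by omega)]; exact hf.saved_r14
      saved_r15 := by rw [e2.u64 _ (by omega) (by omega) (by omega)]; exact hf.saved_r15
      saved_ra := by rw [e2.u64 _ (by omega) (by omega) (by omega)]; exact hf.saved_ra
      code := hcode
      inv := hinv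
      shadow := hf.shadow.untouched hun
      offText := hf.offText
      ext := hf.ext
      callers := hf.callers
      sh7 := ?_
      same := ?_ }
  · intro i hi
    have e : (UInt64.ofNat (Vorbis.Globals.log2_4.beg + i) : Word) = addr (0x120640 + i) := rfl
    rw [e, e3.readLE_addr _ 1 (by omega) (by omega) (by omega)]
    have := hf.sh7 i hi
    rw [e] at this
    exact this
  · apply hf.same.step_same hs
    intro w hw' a h1 h2
    have := hw w hw'
    unfold FrameWin at this
    have ef : (g.e.reg .rdi).toNat = g.f := rfl
    have hstack : (g.RA - 1888 ≤ w.lo ∧ w.hi ≤ g.RA) → ∃ w' ∈ footprint g, w'.lo ≤ a ∧ a < w'.hi := by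
      intro hin
      refine ⟨⟨g.RA - depth, g.RA⟩, List.mem_cons_self, ?_, ?_⟩
      · simp only [depth]
        omega
      · simp only []
        omega
    have hobjw : (g.f ≤ w.lo ∧ w.hi ≤ g.f + 1808) → ∃ w' ∈ footprint g, w'.lo ≤ a ∧ a < w'.hi := by
      intro hin
      refine ⟨(objBlock (g.e.reg .rdi).toNat).span, List.mem_cons_of_mem _ List.mem_cons_self, ?_, ?_⟩
      · rw [ef]
        simp only [objBlock, Block.span, voff]
        omega
      · rw [ef]
        simp only [objBlock, Block.span, voff]
        omega
    rcases this with k | k | k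
    · exact hstack (by omega)
    · exact hstack (by omega)
    · exact hobjw (by omega)

/-- An allowed window of the segment and its callees is a window that `Frame` does not read. -/
theorem OkWin.frameWin {g : Ghost} {w : Span} (h : OkWin g w) : FrameWin g w := by
  unfold OkWin at h
  unfold FrameWin
  omega

/-- **The common part `Frame` over a batch of allowed stores** (`OkWin`) that leaves the shadow alone. -/
theorem frame_carry {u₀ : State} {g : Ghost} {pc pc' : Word} {A : Arena × List Obj} {v v' : State} {ws : List Span}
    (hf : Frame u₀ g pc A v) (geo : Geo g) (hrip : v'.rip = pc') (hrsp : v'.reg .rsp = v.reg .rsp)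
    (hcode : CodeOK u₀ v'.mem) (hinv : abiInv v') (hs : Mem.SameExcept ws v.mem v'.mem) (hw : ∀ w, w ∈ ws → OkWin g w)
    (hun : ShadowUntouched v.mem v'.mem) : Frame u₀ g pc' A v' :=
  frame_carry_win hf geo hrip hrsp hcode hinv hs (fun w hw' => (hw w hw').frameWin) hun

/-- **SD.ERR from `Inv`** (an error exit of segment `.2`): DeinitOK from OB1, the arena's buffer, and the zero ranges (every
pointer of `*f` that vorbis_deinit looks at is still NULL, `comment_list_length = 0`); ArenaErr from ArenaOK. -/
theorem Inv.failed {g : Ghost} {A : Arena × List Obj} {mem : Mem} (h : Inv g A mem) :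
    Failed g.len g.f (g.Live A) A mem := by
  have hr := h.rest
  have hv := h.zvendor
  simp only [voff] at hv
  have h1 : H1 (g.Blk A) mem g.f := by
    left
    have e : stb_vorbis.comment_list_length mem g.f = 0 := by
      simp only [vacc, voff]
      exact hv.i32 32 (by omega) (by omega)
    omega
  refine ⟨⟨h.env, ⟨Bits.ob1 h.bits, ArenaOK.alloc_buffer_ne_zero h.arena, h1, ?_, ?_, ?_, ?_⟩, h.bits⟩, h.arena.AR1, ?_⟩
  · exact H2.of_null (hr.residue_null (by simp only [voff]; omega)).1
  · exact H3.of_null (hr.residue_null (by simp only [voff]; omega)).1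
  · exact H4.of_null (hr.codebooks_null (by simp only [voff]; omega))
  · exact H5.of_null (hr.mapping_null (by simp only [voff]; omega))
  · intro o ho
    apply h.arena.AR6 o
    unfold Arena.objs
    exact List.mem_append_left _ ho


/-- **A window of the segment's OWN stores**: the stack below `[R + 8]` (the return addresses of its calls), the own frame between the
spill slots and the saved registers, the byte `first_decode`, and `eof` + `error` (the callee `error`). None meets a field that `Bits` reads. -/
def OwnWin (g : Ghost) (w : Span) : Prop :=
  (g.RA - 1888 ≤ w.lo ∧ w.hi ≤ g.R + 8) ∨ (g.R + 0x10 ≤ w.lo ∧ w.hi ≤ g.R + 0x598) ∨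
  (g.f + 1749 ≤ w.lo ∧ w.hi ≤ g.f + 1750) ∨ (g.f + 136 ≤ w.lo ∧ w.hi ≤ g.f + 144)

/-- A window of the segment's own stores is a window that `Frame` does not read. -/
theorem OwnWin.frameWin {g : Ghost} {w : Span} (h : OwnWin g w) : FrameWin g w := by
  unfold OwnWin at h
  unfold FrameWin
  omega

/-- **The common part `Frame` over the segment's OWN stores** (`OwnWin`: stage A writes the byte `first_decode`, which `OkWin`
excludes) that leave the shadow alone. -/
theorem frame_carry_own {u₀ : State} {g : Ghost} {pc pc' : Word} {A : Arena × List Obj} {v v' : State} {ws : List Span}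
    (hf : Frame u₀ g pc A v) (geo : Geo g) (hrip : v'.rip = pc') (hrsp : v'.reg .rsp = v.reg .rsp)
    (hcode : CodeOK u₀ v'.mem) (hinv : abiInv v') (hs : Mem.SameExcept ws v.mem v'.mem) (hw : ∀ w, w ∈ ws → OwnWin g w)
    (hun : ShadowUntouched v.mem v'.mem) : Frame u₀ g pc' A v' :=
  frame_carry_win hf geo hrip hrsp hcode hinv hs (fun w hw' => (hw w hw').frameWin) hun

/-- **`Bits` and `next_seg` over the segment's own stores** (what a callee's precondition needs at a call site). -/
theorem own_stores {g : Ghost} {A : Arena × List Obj} {mem mem' : Mem} {ws : List Span} (geo : Geo g)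
    (hb : Bits (g.Blk A) g.len mem g.f) (hs : Mem.SameExcept ws mem mem') (hw : ∀ w, w ∈ ws → OwnWin g w) :
    Bits (g.Blk A) g.len mem' g.f ∧ stb_vorbis.next_seg mem' g.f = stb_vorbis.next_seg mem g.f := by
  obtain ⟨r1, r2, a2, a3, hobj, hlo, hhi, _⟩ := geo
  have hsf : Bits.SameFields mem mem' g.f := by
    apply Bits.SameFields.of_sameExcept hs
    all_goals
      intro w hw'
      have := hw w hw'
      unfold OwnWin at this
      omega
  refine ⟨hb.frame_fields hsf, ?_⟩
  simp only [vacc, voff]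
  exact hsf.next_seg.i32 _ (by omega) (by omega) (by omega)

/-- **`Inv` after the first store of the segment** (`first_decode = 1`), from P3 at the segment's entry. -/
theorem inv_of_p3 {g : Ghost} {A : Arena × List Obj} {mem mem' : Mem} {ws : List Span} (h : Real.P3 g.len A (g.Blk A) (g.Live A) mem g.f)
    (geo : Geo g) (hs : Mem.SameExcept ws mem mem') (hw : ∀ w, w ∈ ws → OwnWin g w) (hun : ShadowUntouched mem mem')
    (hfirst : stb_vorbis.first_decode mem' g.f = 1) : Inv g A mem' := by
  have hbits := (own_stores geo h.bits hs hw).1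
  obtain ⟨r1, r2, a2, a3, hobj, hlo, hhi, _⟩ := geo
  have e1 : Mem.EqOn (g.f + 112) (g.f + 136) mem mem' := by
    apply hs.eqOn
    intro w hw'
    have := hw w hw'
    unfold OwnWin at this
    omega
  have e3 : Mem.EqOn (g.f + 1784) (g.f + 1788) mem mem' := by
    apply hs.eqOn
    intro w hw'
    have := hw w hw'
    unfold OwnWin at this
    omega
  have e4 : Mem.EqOn (g.f + 24) (g.f + 48) mem mem' := by
    apply hs.eqOn
    intro w hw'
    have := hw w hw'
    unfold OwnWin at this
    omega
  have e5 : Mem.EqOn (g.f + 160) (g.f + 1480) mem mem' := by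
    apply hs.eqOn
    intro w hw'
    have := hw w hw'
    unfold OwnWin at this
    omega
  have hz2 := h.h0.z2
  simp only [voff] at hz2
  obtain ⟨hzv, hzr⟩ := p3_zero h
  have harena : ArenaOK A.1 A.2 mem g.f := h.arena
  refine ⟨h.env.eqOn hun, ?_, h.fresh.2, hbits, hfirst, ?_, ?_, ?_⟩
  · apply harena.frame
    · simp only [voff]
      omega
    · simp only [voff]
      exact e1
  · have e : stb_vorbis.discard_samples_deferred mem' g.f = stb_vorbis.discard_samples_deferred mem g.f := by
      simp only [vacc, voff]
      exact e3.i32 _ (by omega) (by omega) (by omega)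
    rw [e]
    simp only [vacc, voff]
    exact hz2.i32 1784 (by omega) (by omega)
  · simp only [voff] at hzv ⊢
    exact hzv.frame e4 (by omega)
  · unfold RestZero at hzr ⊢
    simp only [voff] at hzr ⊢
    exact hzr.frame e5 (by omega)

/-- `next_seg = 0` at the segment's entry (H0). -/
theorem p3_next_seg {g : Ghost} {A : Arena × List Obj} {mem : Mem} (h : Real.P3 g.len A (g.Blk A) (g.Live A) mem g.f) :
    stb_vorbis.next_seg mem g.f = 0 := by
  have hz2 := h.h0.z2
  simp only [voff] at hz2
  simp only [vacc, voff]
  exact hz2.i32 1752 (by omega) (by omega)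

/-- **A point inside segment `.2`** (after a call's return, at an error stub): the common part at `pc`, the hand-over carrier,
rbp = f, and `Inv` of the memory. -/
structure Pt (u₀ : State) (g : Ghost) (A : Arena × List Obj) (pc : Word) (v : State) : Prop where
  /-- the common part of every cut point of start_decoder, at `pc` -/
  frame : Frame u₀ g pc A v
  /-- the hand-over carrier (memory-independent) -/
  hand : g.Hand A
  /-- rbp = f (callee-saved: every call of the segment passes `mov rdi, rbp`) -/
  rbp : v.reg .rbp = addr g.f
  /-- what holds of the memory after `first_decode = 1` -/
  inv : Inv g A v.mem

/-- The geometry at a point. -/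
theorem Pt.geo {u₀ : State} {g : Ghost} {A : Arena × List Obj} {pc : Word} {v : State} (h : Pt u₀ g A pc v) : Geo g :=
  geo_of h.frame h.hand h.inv.env.ok h.inv.bits

/-- **From one point to the next**: over a batch of allowed stores (own stores and a callee's footprint) that leaves the shadow alone. -/
theorem Pt.step {u₀ : State} {g : Ghost} {A : Arena × List Obj} {pc pc' : Word} {v v' : State} {ws : List Span}
    (h : Pt u₀ g A pc v) (hrip : v'.rip = pc') (hrsp : v'.reg .rsp = v.reg .rsp) (hrbp : v'.reg .rbp = v.reg .rbp)
    (hcode : CodeOK u₀ v'.mem) (hinv : abiInv v') (hs : Mem.SameExcept ws v.mem v'.mem) (hw : ∀ w, w ∈ ws → OkWin g w)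
    (hun : ShadowUntouched v.mem v'.mem) (hbits : Bits (g.Blk A) g.len v'.mem g.f) : Pt u₀ g A pc' v' :=
  ⟨frame_carry h.frame h.geo hrip hrsp hcode hinv hs hw hun, h.hand, by rw [hrbp]; exact h.rbp,
    h.inv.carry h.geo hs hw hun hbits⟩

/-- **From one point to the next when the memory has not changed** (a compare and a branch, e.g. to a stub). -/
theorem Pt.same_mem {u₀ : State} {g : Ghost} {A : Arena × List Obj} {pc pc' : Word} {v v' : State}
    (h : Pt u₀ g A pc v) (hrip : v'.rip = pc') (hrsp : v'.reg .rsp = v.reg .rsp) (hrbp : v'.reg .rbp = v.reg .rbp)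
    (hinv : abiInv v') (hmem : v'.mem = v.mem) : Pt u₀ g A pc' v' := by
  have hs : Mem.SameExcept [] v.mem v'.mem := by
    rw [hmem]
    exact Mem.SameExcept.refl _ _
  have hun : ShadowUntouched v.mem v'.mem := by
    rw [hmem]
    exact Mem.EqOn.refl _ _ _
  have hcode : CodeOK u₀ v'.mem := by
    rw [hmem]
    exact h.frame.code
  have hbits : Bits (g.Blk A) g.len v'.mem g.f := by
    rw [hmem]
    exact h.inv.bits
  exact h.step hrip hrsp hrbp hcode hinv hs (fun w hw => nomatch hw) hun hbits

/-- **The exit to the epilogue with eax = 0**: SD.ERR. -/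
theorem Pt.atERR {u₀ : State} {g : Ghost} {A : Arena × List Obj} {v : State} (h : Pt u₀ g A pc_ERR v)
    (hax : (v.reg .rax).toNat % 2 ^ 32 = 0) : AtERR u₀ g v :=
  ⟨A, h.frame, h.hand, Or.inl ⟨hax, h.inv.failed⟩⟩

/-- **The exit to segment `.3`**: `SD 0` from `Inv`, ONE20, Z10; `next_seg = 0`. -/
theorem Pt.at3 {u₀ : State} {g : Ghost} {A : Arena × List Obj} {v : State} (h : Pt u₀ g A pc_3 v)
    (h20 : v.mem.u32 (g.R + 0x20) = 1) (h10 : v.mem.u8 (g.R + 0x10) = 0) (hn : stb_vorbis.next_seg v.mem g.f = 0) :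
    At3 u₀ g v :=
  ⟨A, h.frame, h.hand, h.rbp,
    sd0_of_parts h.inv.env h.inv.arena h.inv.noTemps h.inv.bits
      ⟨h.geo.r8, h.frame.shadowIdx, h20, fun _ => h10, fun h2 _ => absurd h2 (by omega)⟩ (up g A) h.inv.first h.inv.discard0
      h.inv.zvendor h.inv.rest,
    hn⟩

/-- The segment's own windows, as a literal list over the steady stack pointer. -/
theorem ownWins_ok (g : Ghost) (geo : Geo g) :
    ∀ w, w ∈ [(⟨g.R - 408, g.R⟩ : Span), ⟨g.R + 16, g.R + 17⟩, ⟨g.R + 32, g.R + 36⟩, ⟨g.f + 1749, g.f + 1750⟩,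
      ⟨g.f + 136, g.f + 144⟩] → OwnWin g w := by
  obtain ⟨r1, r2, a2, a3, hobj, hlo, hhi, _⟩ := geo
  intro w hw
  simp only [List.mem_cons, List.mem_nil_iff, or_false] at hw
  unfold OwnWin
  rcases hw with rfl | rfl | rfl | rfl | rfl <;> simp only [] <;> omega

/-- The windows of the segment and its callees after the first store, as a literal list. -/
theorem allWins_ok (g : Ghost) (geo : Geo g) :
    ∀ w, w ∈ [(⟨g.R - 408, g.R⟩ : Span), ⟨g.R + 16, g.R + 17⟩, ⟨g.R + 32, g.R + 36⟩, ⟨g.R + 160, g.R + 166⟩,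
      ⟨g.f + 48, g.f + 56⟩, ⟨g.f + 84, g.f + 96⟩, ⟨g.f + 136, g.f + 144⟩, ⟨g.f + 1484, g.f + 1748⟩,
      ⟨g.f + 1752, g.f + 1756⟩, ⟨g.f + 1776, g.f + 1784⟩] → OkWin g w := by
  obtain ⟨r1, r2, a2, a3, hobj, hlo, hhi, _⟩ := geo
  intro w hw
  simp only [List.mem_cons, List.mem_nil_iff, or_false] at hw
  unfold OkWin
  rcases hw with rfl | rfl | rfl | rfl | rfl | rfl | rfl | rfl | rfl | rfl <;> simp only [] <;> omega
/-- **The entry of one of the seven error stubs of segment `.2`** (`mov esi, code ; mov rdi, rbp ; call error`). -/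
def IsStub (pc : Word) : Prop :=
  pc = Vorbis.L.start_decoder.at_113b15 ∨ pc = Vorbis.L.start_decoder.at_113b7a ∨ pc = Vorbis.L.start_decoder.at_113b89 ∨
  pc = Vorbis.L.start_decoder.at_113b98 ∨ pc = Vorbis.L.start_decoder.at_113baa ∨ pc = Vorbis.L.start_decoder.at_113bdc ∨
  pc = Vorbis.L.start_decoder.at_113bfa

/-- **A point of the segment at the entry of an error stub**: `Pt` at one of the seven addresses. -/
def AtStub (u₀ : State) (g : Ghost) (A : Arena × List Obj) (v : State) : Prop :=
  ∃ pc, IsStub pc ∧ Pt u₀ g A pc v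

/-- **The first point of the segment, from `Body2`** (stage A): the memory `mid` after the segment's own stores (return addresses,
`first_decode = 1`: `OwnWin`), then a callee's footprint (`OkWin`) up to `v'`; `Frame` over both at once (`FrameWin`). -/
theorem Pt.of_body2 {u₀ : State} {g : Ghost} {A : Arena × List Obj} {pc' : Word} {v v' : State} {mid : Mem}
    {ws ws1 ws2 : List Span} (hb : Body2 u₀ g A v)
    (hrip : v'.rip = pc') (hrsp : v'.reg .rsp = v.reg .rsp) (hrbp : v'.reg .rbp = v.reg .rbp)
    (hcode : CodeOK u₀ v'.mem) (hinv : abiInv v')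
    (hs : Mem.SameExcept ws v.mem v'.mem) (hw : ∀ w, w ∈ ws → FrameWin g w) (hun : ShadowUntouched v.mem v'.mem)
    (hs1 : Mem.SameExcept ws1 v.mem mid) (hw1 : ∀ w, w ∈ ws1 → OwnWin g w) (hun1 : ShadowUntouched v.mem mid)
    (hfirst : stb_vorbis.first_decode mid g.f = 1)
    (hs2 : Mem.SameExcept ws2 mid v'.mem) (hw2 : ∀ w, w ∈ ws2 → OkWin g w) (hun2 : ShadowUntouched mid v'.mem)
    (hbits : Bits (g.Blk A) g.len v'.mem g.f) : Pt u₀ g A pc' v' := by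
  have geo : Geo g := geo_of hb.frame hb.hand hb.p3.env.ok hb.p3.bits
  have hmid : Inv g A mid := inv_of_p3 hb.p3 geo hs1 hw1 hun1 hfirst
  refine ⟨frame_carry_win hb.frame geo hrip hrsp hcode hinv hs hw hun, hb.hand, ?_, hmid.carry geo hs2 hw2 hun2 hbits⟩
  rw [hrbp]
  exact hb.rbp

end P2

/-- **Cut 0x113a46 (`cut2`): the return of `start_page(f)`** (line 3616, before `test eax, eax`): a point of the segment (Frame, Hand,
rbp = f, `P2.Inv`: `first_decode = 1` is stored) ∧ eax = start_page's result ∈ {0, 1} ∧ for 1 the page is started (`next_seg = 0`,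
which `At3` states and the second start_page of `.4` needs). eax = 0 leaves to the epilogue (`P2.Pt.atERR`). -/
structure Body2b (u₀ : State) (g : Ghost) (A : Arena × List Obj) (v : State) : Prop where
  /-- the point at the return address of the call at 0x113a41 -/
  pt : P2.Pt u₀ g A Vorbis.L.start_decoder.cut2 v
  /-- start_page's result (`StartPagePost.result`; the whole register) -/
  result : v.reg .rax = 0 ∨ v.reg .rax = 1
  /-- the page is started (`StartPagePost.started`) -/
  started : v.reg .rax = 1 → stb_vorbis.next_seg v.mem g.f = 0

/-- **Segment .2a, 0x113a2b–0x113a41** (lines 3614–3616): the checked store `f->first_decode = TRUE` (check site 0x113a32) and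
`start_page(f)`, which returns into 0x113a46 (`Body2b`). -/
def Seg2a (Lay : Layout) (μ : Microarch) (u₀ : State) : Prop :=
  ∀ (g : Ghost) (A : Arena × List Obj) (v : State), Body2 u₀ g A v → ReachVia Lay μ WayInv v (fun w => Body2b u₀ g A w)

/-- **Segment .2b, 0x113a46–0x113acc + 0x113bee–0x113bf8** (lines 3616–3625, 3641): `!start_page(f)` → the epilogue with eax = 0; the
three checked loads (`page_flag`, `segment_count`, `segments[0]`) and their tests, each failing into a stub; `segments[0] == 30`:
`get8(f) == VORBIS_packet_id` → .3 (`At3`), else the stub 0x113bfa; `segments[0] == 64`: `getn(f, header, 6)` returns into 0x113ad1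
(a point at `cut3`); anything else: the stub 0x113b15. -/
def Seg2b (Lay : Layout) (μ : Microarch) (u₀ : State) : Prop :=
  ∀ (g : Ghost) (A : Arena × List Obj) (v : State), Body2b u₀ g A v →
    ReachVia Lay μ WayInv v (fun w => At3 u₀ g w ∨ AtERR u₀ g w ∨ P2.AtStub u₀ g A w ∨ P2.Pt u₀ g A Vorbis.L.start_decoder.cut3 w)

/-- **Segment .2c, 0x113ad1–0x113b0f + 0x113bbc–0x113bd6** (lines 3625–3636, the fishead diagnosis): getn failed or `header` is not
"fishea" or the next two bytes are not "d\0" → the stub 0x113b15 (invalid_first_page); otherwise the stub 0x113bdc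
(ogg_skeleton_not_supported). Every path ends at a stub. -/
def Seg2c (Lay : Layout) (μ : Microarch) (u₀ : State) : Prop :=
  ∀ (g : Ghost) (A : Arena × List Obj) (v : State), P2.Pt u₀ g A Vorbis.L.start_decoder.cut3 v →
    ReachVia Lay μ WayInv v (fun w => P2.AtStub u₀ g A w)

/-- **Segment .2d, the seven error stubs** 0x113b15–0x113b1d, 0x113b7a–0x113bb7, 0x113bdc–0x113be9, 0x113bfa–0x113c07 (`return
error(f, …)` of lines 3618 3619 3620 3622 3634 3636 3641): from a point at a stub's entry to the epilogue with eax = 0 (`AtERR`). -/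
def Seg2d (Lay : Layout) (μ : Microarch) (u₀ : State) : Prop :=
  ∀ (g : Ghost) (A : Arena × List Obj) (v : State), P2.AtStub u₀ g A v → ReachVia Lay μ WayInv v (fun w => AtERR u₀ g w)

/-- **The composition of segment .2 from its four parts**: .2a reaches `Body2b`; .2b leaves to .3 / the epilogue, or reaches a stub or
the point at `cut3`; .2c reaches a stub; .2d goes from a stub to the epilogue. Pure logic (`ReachVia.trans`). -/
theorem Seg2.of_parts {Lay : Layout} {μ : Microarch} {u₀ : State}
    (ha : Seg2a Lay μ u₀) (hb : Seg2b Lay μ u₀) (hc : Seg2c Lay μ u₀) (hd : Seg2d Lay μ u₀) : Seg2 Lay μ u₀ := by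
  intro g v hat
  obtain ⟨A, hbody⟩ := hat
  refine (ha g A v hbody).trans ?_
  intro va h2b
  refine (hb g A va h2b).trans ?_
  intro vb hvb
  rcases hvb with h3 | herr | hstub | hcut3
  · exact ReachVia.done (Or.inl h3)
  · exact ReachVia.done (Or.inr herr)
  · refine (hd g A vb hstub).trans ?_
    intro vd hvd
    exact ReachVia.done (Or.inr hvd)
  · refine (hc g A vb hcut3).trans ?_
    intro vc hstub
    refine (hd g A vc hstub).trans ?_
    intro vd hvd
    exact ReachVia.done (Or.inr hvd)

end Vorbis.Spec.StartDecoder
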